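-- pv_equiv track=rewrite | github.com/think101/Python101 | src/grind75/accounts_merge.py | accountsMerge_wrong
-- ===== SOURCE A (Python) =====
-- from typing import List
--
-- def accountsMerge_wrong(accounts: List[List[str]]) -> List[List[str]]:
--     d = {}
--
--     for a in accounts:
--         if a[0] not in d:
--             d.setdefault(a[0], [])
--
--         merged = False
--         for i in range(1, len(a)):
--             for j in range(len(d[a[0]])):
--                 if a[i] in d[a[0]][j]:
--                     d[a[0]][j] = d[a[0]][j] + a[1:]
--                     merged = True
--                     break
--
--             if merged:
--                 break
--
--         if not merged:
--             d[a[0]].append(a[1:])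
--
--     res = []
--     for name in d:
--         for emails in d[name]:
--             res.append([name] + sorted(set(emails)))
--
--     return res
-- ===== SOURCE B (Python) =====
-- from typing import List
--
-- def accountsMerge_wrong(accounts: List[List[str]]) -> List[List[str]]:
--     # Staged algorithm: (1) bucket the accounts by name; (2) per name, compute a
--     # group-assignment number for each account by looking back at the ORIGINAL
--     # earlier accounts of that name (never at accumulated group contents);
--     # (3) assemble each group's emails once, from the assignments.
--     by_name = {}
--     for a in accounts:
--         by_name.setdefault(a[0], []).append(a[1:])
--     res = []
--     for name, accts in by_name.items():
--         done = []     # (emails, assigned group number), in processing order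
--         ngroups = 0
--         for emails in accts:
--             target = None
--             for e in emails:
--                 hits = [g for prev, g in done if e in prev]
--                 if hits:
--                     target = min(hits)
--                     break
--             if target is None:
--                 target = ngroups
--                 ngroups += 1
--             done.append((emails, target))
--         for j in range(ngroups):
--             group = [e for prev, g in done if g == j for e in prev]
--             res.append([name] + sorted(set(group)))
--     return res
-- ===== Notes on version B (the rewrite author's own statement) =====
-- stated objective: alternative
-- what changed: B replaces A's single online pass that grows group contents inside a dict (rescanning the accumulated group email lists to find the merge target) by a staged algorithm: bucket accounts by name, then per name compute a group-assignment number for each account by looking back only at the ORIGINAL earlier accounts of that name, then assemble each group's emails once from the assignments; no group contents exist during the assignment pass.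
import Mathlib
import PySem

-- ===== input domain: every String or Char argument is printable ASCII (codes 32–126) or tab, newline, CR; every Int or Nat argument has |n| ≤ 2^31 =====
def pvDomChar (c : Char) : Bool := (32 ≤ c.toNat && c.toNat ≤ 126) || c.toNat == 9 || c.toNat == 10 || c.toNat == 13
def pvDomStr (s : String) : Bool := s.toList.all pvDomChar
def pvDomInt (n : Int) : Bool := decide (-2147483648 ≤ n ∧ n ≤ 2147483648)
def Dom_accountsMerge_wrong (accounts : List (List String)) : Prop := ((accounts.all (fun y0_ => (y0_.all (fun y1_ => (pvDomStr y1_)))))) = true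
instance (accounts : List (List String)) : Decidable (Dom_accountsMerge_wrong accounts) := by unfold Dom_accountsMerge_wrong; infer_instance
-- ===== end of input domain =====

-- B is a staged re-implementation: bucket the accounts by name, assign each account a group
-- number by looking only at the original earlier accounts of its name, then assemble the
-- groups once from the assignments (A instead grows group contents online inside a dict).

-- ===== PORT A =====
-- One account step of A: setdefault, then the i/j double loop with break (findSome?/findIdx?),
-- then either extend group j with a[1:] or append a[1:] as a new group.
def amwAStep (d : PySem.Dict String (List (List String))) (a : List String) :
    PySem.Dict String (List (List String)) :=
  match a with
  | [] => d  -- unreachable under Pre_ (Python raises IndexError on a[0])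
  | name :: rest =>
    let d := if d.contains name then d else d.setdefault name []
    let groups := d.getD name []
    match rest.findSome? (fun e => groups.findIdx? (fun g => g.contains e)) with
    | some j => d.insert name (groups.set j (groups.getD j [] ++ rest))
    | none   => d.insert name (groups ++ [rest])

def accountsMerge_wrong (accounts : List (List String)) : List (List String) :=
  let d := accounts.foldl amwAStep PySem.Dict.empty
  -- res loop: for name in d: for emails in d[name]: res.append([name] + sorted(set(emails)))
  d.items.foldl (fun res p =>
    res ++ p.2.map (fun emails =>
      p.1 :: PySem.List.sorted (PySem.Set.ofList emails) (fun x => x) false)) []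

-- ===== PORT B =====
-- Stage 1 of B: by_name.setdefault(a[0], []).append(a[1:]).
def amwBucket (m : PySem.Dict String (List (List String))) (a : List String) :
    PySem.Dict String (List (List String)) :=
  match a with
  | [] => m  -- unreachable under Pre_ (Python raises IndexError on a[0])
  | name :: rest => m.insert name (m.getD name [] ++ [rest])

-- Stage 2 of B, inner loop: first email hitting an earlier account of this name,
-- min of the hit accounts' group numbers.
def amwTarget (done : List (List String × Nat)) (emails : List String) : Option Nat :=
  emails.findSome? (fun e =>
    ((done.filter (fun p => p.1.contains e)).map Prod.snd).min?)

-- Stage 2 of B, one account: append (emails, target) to done, bumping ngroups when fresh.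
def amwAssignStep (st : List (List String × Nat) × Nat) (emails : List String) :
    List (List String × Nat) × Nat :=
  match amwTarget st.1 emails with
  | some t => (st.1 ++ [(emails, t)], st.2)
  | none   => (st.1 ++ [(emails, st.2)], st.2 + 1)

-- Stage 2 of B: the fold computing (done, ngroups) for one name's account list.
def amwAssign (accts : List (List String)) : List (List String × Nat) × Nat :=
  accts.foldl amwAssignStep ([], 0)

def accountsMerge_wrong_alt (accounts : List (List String)) : List (List String) :=
  let byName := accounts.foldl amwBucket PySem.Dict.empty
  -- Stage 3: per name, per group number j, collect the assigned accounts' emails.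
  byName.items.foldl (fun res p =>
    let st := amwAssign p.2
    res ++ (List.range st.2).map (fun j =>
      p.1 :: PySem.List.sorted
        (PySem.Set.ofList ((st.1.filter (fun q => q.2 == j)).flatMap Prod.fst))
        (fun x => x) false)) []

-- ===== PRECONDITION & SPEC =====
-- Pre_ excludes exactly the accounts lists containing an empty account: there Python A
-- raises IndexError on a[0] (and B raises the same way).
def Pre_accountsMerge_wrong (accounts : List (List String)) : Prop :=
  ∀ a ∈ accounts, a ≠ []
instance (accounts : List (List String)) : Decidable (Pre_accountsMerge_wrong accounts) := by
  unfold Pre_accountsMerge_wrong; infer_instance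

def pvWitness_accountsMerge_wrong : List (List String) :=
  [["john", "j@x.com", "j2@x.com"], ["john", "j2@x.com"], ["mary", "m@x.com"]]

def Spec_accountsMerge_wrong (accounts : List (List String)) (out : List (List String)) : Prop :=
  out = accountsMerge_wrong_alt accounts
instance (accounts : List (List String)) (out : List (List String)) :
    Decidable (Spec_accountsMerge_wrong accounts out) := by
  unfold Spec_accountsMerge_wrong; infer_instance

-- ===== CLAIM (what is proved, stated in full; the proofs are below) =====
def Claim_equal_accountsMerge_wrong : Prop :=
  ∀ (accounts : List (List String)), Dom_accountsMerge_wrong accounts →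
    Pre_accountsMerge_wrong accounts →
    Spec_accountsMerge_wrong accounts (accountsMerge_wrong accounts)

-- ===== LEMMAS AND PROOFS =====

-- A's per-name group step, extracted from amwAStep.
def amwStepG (gs : List (List String)) (emails : List String) : List (List String) :=
  match emails.findSome? (fun e => gs.findIdx? (fun g => g.contains e)) with
  | some j => gs.set j (gs.getD j [] ++ emails)
  | none   => gs ++ [emails]

-- B's reconstruction of the group lists from (done, ngroups).
def amwGroups (done : List (List String × Nat)) (n : Nat) : List (List String) :=
  (List.range n).map (fun j => (done.filter (fun q => q.2 == j)).flatMap Prod.fst)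

theorem amwAStep_eq (d : PySem.Dict String (List (List String))) (name : String)
    (rest : List String) :
    amwAStep d (name :: rest) = d.insert name (amwStepG (d.getD name []) rest) := by
  unfold amwAStep amwStepG
  have hgD : (if d.contains name then d else d.setdefault name []).getD name [] =
      d.getD name [] := by
    by_cases hc : d.contains name
    · simp [hc]
    · simp [hc, PySem.Dict.getD_setdefault_self]
  have hIns : ∀ X, (if d.contains name then d else d.setdefault name []).insert name X =
      d.insert name X := by
    intro X
    by_cases hc : d.contains name
    · simp [hc]
    · have hc' : d.contains name = false := by simpa using hc
      rw [if_neg (by simp [hc']), PySem.Dict.setdefault_of_not_contains _ _ hc',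
        PySem.Dict.insert_insert_self]
  simp only [hgD]
  cases rest.findSome? (fun e => (d.getD name []).findIdx? (fun g => g.contains e)) with
  | some j => exact hIns _
  | none => exact hIns _

theorem amwGroups_getElem (done : List (List String × Nat)) (n j : Nat) (hj : j < n) :
    (amwGroups done n)[j]'(by simp [amwGroups, hj]) =
      (done.filter (fun q => q.2 == j)).flatMap Prod.fst := by
  simp [amwGroups]

theorem amwMemFlat (done : List (List String × Nat)) (j : Nat) (e : String) :
    ((done.filter (fun q => q.2 == j)).flatMap Prod.fst).contains e = true ↔
      ∃ q ∈ done, q.2 = j ∧ e ∈ q.1 := by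
  simp only [List.contains_eq_mem, decide_eq_true_iff, List.mem_flatMap, List.mem_filter,
    beq_iff_eq]
  constructor
  · rintro ⟨a, ⟨ha, hj⟩, he⟩
    exact ⟨a, ha, hj, he⟩
  · rintro ⟨q, hq, hj, he⟩
    exact ⟨q, ⟨hq, hj⟩, he⟩

-- (L1) the merge target A reads off the accumulated group contents equals the one
-- B reads off the original earlier accounts.
theorem amwFindIdx_eq_min (done : List (List String × Nat)) (n : Nat)
    (hb : ∀ q ∈ done, q.2 < n) (e : String) :
    (amwGroups done n).findIdx? (fun g => g.contains e) =
      ((done.filter (fun p => p.1.contains e)).map Prod.snd).min? := by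
  cases hmin : ((done.filter (fun p => p.1.contains e)).map Prod.snd).min? with
  | none =>
    rw [List.min?_eq_none_iff, List.map_eq_nil_iff, List.filter_eq_nil_iff] at hmin
    rw [List.findIdx?_eq_none_iff]
    intro g hg
    simp only [amwGroups, List.mem_map] at hg
    obtain ⟨j, hj, rfl⟩ := hg
    rw [Bool.eq_false_iff]
    intro hc
    rw [amwMemFlat done j e] at hc
    obtain ⟨q, hq, _, he⟩ := hc
    exact hmin q hq (by rw [List.contains_eq_mem]; exact decide_eq_true he)
  | some m =>
    obtain ⟨hm, hle⟩ := List.min?_eq_some_iff_subtype.mp hmin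
    simp only [List.mem_map, List.mem_filter] at hm
    obtain ⟨q, ⟨hq, hqe⟩, rfl⟩ := hm
    rw [List.findIdx?_eq_some_iff_getElem]
    have hlen : (amwGroups done n).length = n := by simp [amwGroups]
    have hqn : q.2 < n := hb q hq
    refine ⟨by omega, ?_, ?_⟩
    · rw [amwGroups_getElem done n q.2 hqn, amwMemFlat done q.2 e]
      exact ⟨q, hq, rfl, by rwa [List.contains_eq_mem, decide_eq_true_iff] at hqe⟩
    · intro j hj hcj
      have hjn : j < n := by omega
      rw [amwGroups_getElem done n j hjn, amwMemFlat done j e] at hcj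
      obtain ⟨r, hr, hrj, hre⟩ := hcj
      have : q.2 ≤ j := by
        refine hle j ?_
        simp only [List.mem_map, List.mem_filter]
        exact ⟨r, ⟨hr, by rw [List.contains_eq_mem]; exact decide_eq_true hre⟩, hrj⟩
      omega

-- (L2) appending a merged account to done = extending group t in place.
theorem amwGroups_append_hit (done : List (List String × Nat)) (n t : Nat) (ht : t < n)
    (emails : List String) :
    amwGroups (done ++ [(emails, t)]) n =
      (amwGroups done n).set t ((amwGroups done n).getD t [] ++ emails) := by
  apply List.ext_getElem
  · simp [amwGroups]
  · intro i h1 h2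
    have hi : i < n := by simpa [amwGroups] using h1
    rw [List.getElem_set]
    simp only [amwGroups, List.getElem_map, List.getElem_range, List.filter_append,
      List.flatMap_append]
    by_cases hit : i = t
    · subst hit
      rw [List.getD_eq_getElem _ _ (by simpa [amwGroups] using hi)]
      simp only [List.getElem_map, List.getElem_range]
      simp
    · simp [Ne.symm hit]

-- (L3) appending a fresh account to done = appending a new group.
theorem amwGroups_append_new (done : List (List String × Nat)) (n : Nat)
    (hb : ∀ q ∈ done, q.2 < n) (emails : List String) :
    amwGroups (done ++ [(emails, n)]) (n + 1) = amwGroups done n ++ [emails] := by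
  unfold amwGroups
  rw [List.range_succ, List.map_append]
  congr 1
  · apply List.map_congr_left
    intro j hj
    rw [List.mem_range] at hj
    rw [List.filter_append]
    have : [((emails, n) : List String × Nat)].filter (fun q => q.2 == j) = [] := by
      simp; omega
    simp [this]
  · have : done.filter (fun q => q.2 == n) = [] := by
      rw [List.filter_eq_nil_iff]
      intro q hq
      have := hb q hq
      simp; omega
    simp [this]

-- One per-name step preserves the correspondence.
theorem amwStepG_eq (done : List (List String × Nat)) (n : Nat)
    (hb : ∀ q ∈ done, q.2 < n) (emails : List String) :
    amwStepG (amwGroups done n) emails =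
      amwGroups (amwAssignStep (done, n) emails).1 (amwAssignStep (done, n) emails).2 ∧
    ∀ q ∈ (amwAssignStep (done, n) emails).1, q.2 < (amwAssignStep (done, n) emails).2 := by
  have hf : (fun e => (amwGroups done n).findIdx? (fun g => g.contains e)) =
      (fun e => ((done.filter (fun p => p.1.contains e)).map Prod.snd).min?) :=
    funext (amwFindIdx_eq_min done n hb)
  unfold amwStepG amwAssignStep
  rw [hf]
  show (match amwTarget done emails with
        | some j => (amwGroups done n).set j ((amwGroups done n).getD j [] ++ emails)
        | none => amwGroups done n ++ [emails]) = _ ∧ _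
  cases htg : amwTarget done emails with
  | some t =>
    have ht : t < n := by
      obtain ⟨e, _, he⟩ := List.exists_of_findSome?_eq_some htg
      obtain ⟨hm, -⟩ := List.min?_eq_some_iff_subtype.mp he
      simp only [List.mem_map, List.mem_filter] at hm
      obtain ⟨q, ⟨hq, -⟩, rfl⟩ := hm
      exact hb q hq
    refine ⟨(amwGroups_append_hit done n t ht emails).symm, ?_⟩
    intro q hq
    simp only [List.mem_append, List.mem_singleton] at hq
    rcases hq with hq | rfl
    · exact hb q hq
    · exact ht
  | none =>
    refine ⟨(amwGroups_append_new done n hb emails).symm, ?_⟩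
    intro q hq
    simp only [List.mem_append, List.mem_singleton] at hq
    rcases hq with hq | rfl
    · exact Nat.lt_succ_of_lt (hb q hq)
    · exact Nat.lt_succ_self n

theorem amwMain_aux (accts : List (List String)) :
    ∀ (done : List (List String × Nat)) (n : Nat), (∀ q ∈ done, q.2 < n) →
      accts.foldl amwStepG (amwGroups done n) =
        amwGroups (accts.foldl amwAssignStep (done, n)).1
          (accts.foldl amwAssignStep (done, n)).2 ∧
      ∀ q ∈ (accts.foldl amwAssignStep (done, n)).1,
        q.2 < (accts.foldl amwAssignStep (done, n)).2 := by
  induction accts with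
  | nil => intro done n hb; exact ⟨rfl, hb⟩
  | cons a l ih =>
    intro done n hb
    obtain ⟨h1, h2⟩ := amwStepG_eq done n hb a
    simp only [List.foldl_cons, h1]
    exact ih (amwAssignStep (done, n) a).1 (amwAssignStep (done, n) a).2 h2

-- Per-name main lemma: A's group fold equals B's reconstruction from assignments.
theorem amwMain (accts : List (List String)) :
    accts.foldl amwStepG [] = amwGroups (amwAssign accts).1 (amwAssign accts).2 := by
  have h0 : amwGroups [] 0 = [] := by simp [amwGroups]
  have h := amwMain_aux accts [] 0 (by simp)
  rw [h0] at h
  exact h.1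

-- Dict-level invariant between A's group dict and B's bucket dict.
def amwDictInv (dA dB : PySem.Dict String (List (List String))) : Prop :=
  dA.keys = dB.keys ∧ dB.keys.Nodup ∧
  ∀ name, dA.getD name [] = (dB.getD name []).foldl amwStepG []

theorem amwDictInv_step (dA dB : PySem.Dict String (List (List String)))
    (h : amwDictInv dA dB) (a : List String) :
    amwDictInv (amwAStep dA a) (amwBucket dB a) := by
  obtain ⟨hkeys, hnodup, hgetD⟩ := h
  cases a with
  | nil => exact ⟨hkeys, hnodup, hgetD⟩
  | cons name rest =>
    rw [amwAStep_eq]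
    show amwDictInv (dA.insert name (amwStepG (dA.getD name []) rest))
      (dB.insert name (dB.getD name [] ++ [rest]))
    have hc : dA.contains name = dB.contains name := by
      rw [PySem.Dict.contains_eq_decide_mem_keys, PySem.Dict.contains_eq_decide_mem_keys, hkeys]
    refine ⟨?_, PySem.Dict.nodup_keys_insert _ _ _ hnodup, ?_⟩
    · by_cases hcn : dB.contains name = true
      · rw [PySem.Dict.keys_insert_of_contains _ _ (hc ▸ hcn),
          PySem.Dict.keys_insert_of_contains _ _ hcn, hkeys]
      · have hcn' : dB.contains name = false := by simpa using hcn
        rw [PySem.Dict.keys_insert_of_not_contains _ _ (hc ▸ hcn'),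
          PySem.Dict.keys_insert_of_not_contains _ _ hcn', hkeys]
    · intro k
      rw [PySem.Dict.getD_insert, PySem.Dict.getD_insert]
      by_cases hk : k = name
      · subst hk
        rw [if_pos rfl, if_pos rfl, hgetD k, List.foldl_append]
        rfl
      · rw [if_neg hk, if_neg hk]
        exact hgetD k

theorem amwDictInv_foldl (accounts : List (List String)) :
    amwDictInv (accounts.foldl amwAStep PySem.Dict.empty)
      (accounts.foldl amwBucket PySem.Dict.empty) := by
  have h : ∀ dA dB, amwDictInv dA dB →
      amwDictInv (accounts.foldl amwAStep dA) (accounts.foldl amwBucket dB) := by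
    induction accounts with
    | nil => intro dA dB h; exact h
    | cons a l ih => intro dA dB h; exact ih _ _ (amwDictInv_step dA dB h a)
  refine h _ _ ⟨rfl, PySem.Dict.nodup_keys_empty, ?_⟩
  intro name
  simp [PySem.Dict.getD_empty]

-- ===== VERDICT (by name: the statement is the Claim_ definition above) =====
theorem accountsMerge_wrong_spec : Claim_equal_accountsMerge_wrong := by
  intro accounts _ _
  unfold Spec_accountsMerge_wrong
  obtain ⟨hkeys, hnodup, hgetD⟩ := amwDictInv_foldl accounts
  have hnodupA : (accounts.foldl amwAStep PySem.Dict.empty).keys.Nodup := by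
    rw [hkeys]; exact hnodup
  simp only [accountsMerge_wrong, accountsMerge_wrong_alt,
    PySem.Dict.items_eq_map_keys _ hnodupA ([] : List (List String)),
    PySem.Dict.items_eq_map_keys _ hnodup ([] : List (List String)),
    PySem.List.foldl_append_eq_flatMap, List.nil_append, List.flatMap_map, hkeys]
  apply List.flatMap_congr
  intro k _
  rw [hgetD k, amwMain, amwGroups, List.map_map]
  rfl
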